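-- pv_equiv track=rewrite | github.com/CaiJingLong/marscode_prompt | 017.py | solution
-- ===== SOURCE A (Python) =====
-- def get_prime_factors(n):
--     """获取一个数字的所有素因子"""
--     factors = set()
--     i = 2
--     while i * i <= n:
--         while n % i == 0:
--             factors.add(i)
--             n //= i
--         i += 1
--     if n > 1:
--         factors.add(n)
--     return factors
--
-- def solution(n, a):
--     """
--     判断是否可能通过操作使数组中每个元素最多只包含一种素因子
--     :param n: 数组长度
--     :param a: 输入数组
--     :return: 'Yes' 或 'No'
--     """
--     # 获取每个数的素因子集合
--     prime_sets = [get_prime_factors(num) for num in a]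
--
--     # 统计所有不同的素因子
--     all_primes = set()
--     for prime_set in prime_sets:
--         all_primes.update(prime_set)
--
--     # 只要不同素因子的数量不超过数组长度，就一定可以实现
--     # 因为可以通过多次操作重新分配素因子
--     if len(all_primes) <= n:
--         return 'Yes'
--     return 'No'
-- ===== SOURCE B (Python) =====
-- def solution(n, a):
--     # Precompute all primes up to isqrt(max(a)) once, then factor each
--     # element by dividing only by those primes (early break at p*p > x).
--     m = 0
--     for x in a:
--         if x > m:
--             m = x
--     lim = 0
--     while (lim + 1) * (lim + 1) <= m:
--         lim += 1
--     primes = []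
--     for c in range(2, lim + 1):
--         is_p = True
--         for p in primes:
--             if p * p > c:
--                 break
--             if c % p == 0:
--                 is_p = False
--                 break
--         if is_p:
--             primes.append(c)
--     seen = set()
--     for x in a:
--         for p in primes:
--             if p * p > x:
--                 break
--             while x % p == 0:
--                 seen.add(p)
--                 x //= p
--         if x > 1:
--             seen.add(x)
--     return 'Yes' if len(seen) <= n else 'No'
-- ===== Notes on version B (the rewrite author's own statement) =====
-- stated objective: faster
-- what changed: Instead of running full trial division (all integers 2..sqrt) independently on every element, B precomputes the list of all primes up to isqrt(max(a)) once and factors each element by dividing only by those primes (with early break once p*p > x), accumulating the distinct primes in one global set.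
import Mathlib
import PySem

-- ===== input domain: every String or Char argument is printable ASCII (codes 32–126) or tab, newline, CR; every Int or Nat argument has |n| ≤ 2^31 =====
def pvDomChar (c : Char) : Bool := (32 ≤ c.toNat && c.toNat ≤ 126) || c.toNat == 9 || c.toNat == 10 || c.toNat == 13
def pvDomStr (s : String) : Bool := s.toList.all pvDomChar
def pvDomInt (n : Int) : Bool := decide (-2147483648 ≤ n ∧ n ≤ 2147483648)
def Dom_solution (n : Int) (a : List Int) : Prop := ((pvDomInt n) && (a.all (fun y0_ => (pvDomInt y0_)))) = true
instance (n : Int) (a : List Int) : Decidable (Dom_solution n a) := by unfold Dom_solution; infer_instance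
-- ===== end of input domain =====

-- B precomputes the primes up to isqrt(max(a)) once and factors every element by
-- dividing only by those primes (early break at p*p > x), instead of A's per-element
-- trial division over all integers 2..sqrt; same return value on every input.

-- ===== PORT A =====
-- inner 'while n % i == 0: factors.add(i); n //= i'.  The Nat fuel argument and the
-- guards 2 ≤ i, 0 < n only make the recursion total; with the fuel the wrappers pass,
-- every reachable call computes exactly the Python loop.
def gpfInnerGo : Nat → Int → Int → PySem.Set Int → Int × PySem.Set Int
  | 0, _, n, f => (n, f)
  | fuel + 1, i, n, f =>
    if 2 ≤ i ∧ 0 < n ∧ PySem.Int.mod n i = 0 then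
      gpfInnerGo fuel i (PySem.Int.floordiv n i) (PySem.Set.add f i)
    else (n, f)

def gpfInner (i n : Int) (f : PySem.Set Int) : Int × PySem.Set Int :=
  gpfInnerGo (n.toNat + 1) i n f

-- outer 'while i * i <= n: …; i += 1' (fuel for totality only; i starts at 2)
def gpfOuterGo : Nat → Int → Int → PySem.Set Int → Int × PySem.Set Int
  | 0, _, n, f => (n, f)
  | fuel + 1, i, n, f =>
    if i * i ≤ n then
      gpfOuterGo fuel (i + 1) (gpfInner i n f).1 (gpfInner i n f).2
    else (n, f)

def gpfOuter (i n : Int) (f : PySem.Set Int) : Int × PySem.Set Int :=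
  gpfOuterGo ((n - i).toNat + 1) i n f

def get_prime_factors (n : Int) : PySem.Set Int :=
  let r := gpfOuter 2 n PySem.Set.empty
  if 1 < r.1 then PySem.Set.add r.2 r.1 else r.2

def solution (n : Int) (a : List Int) : String :=
  let prime_sets := a.map get_prime_factors
  let all_primes := prime_sets.foldl (fun s ps => PySem.Set.update s ps) PySem.Set.empty
  if PySem.Set.len all_primes ≤ n then "Yes" else "No"

-- ===== PORT B =====
-- 'while (lim + 1) * (lim + 1) <= m: lim += 1' (fuel for totality only; lim starts at 0)
def isqrtLoopGo : Nat → Int → Int → Int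
  | 0, _, lim => lim
  | fuel + 1, m, lim =>
    if (lim + 1) * (lim + 1) ≤ m then isqrtLoopGo fuel m (lim + 1) else lim

def isqrtLoop (m lim : Int) : Int :=
  isqrtLoopGo ((m - lim).toNat + 1) m lim

-- 'for p in primes: if p*p > c: break; if c % p == 0: is_p = False; break'
def isPrimeLoop (c : Int) (ps : List Int) : Bool :=
  match ps with
  | [] => true
  | p :: rest =>
    if p * p > c then true
    else if PySem.Int.mod c p = 0 then false
    else isPrimeLoop c rest

-- 'for c in range(2, lim + 1): … primes.append(c)'
def buildPrimes (lim : Int) : List Int :=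
  (PySem.List.pyRange 2 (lim + 1)).foldl
    (fun primes c => if isPrimeLoop c primes then primes ++ [c] else primes) []

-- 'while x % p == 0: seen.add(p); x //= p' (fuel and guards for totality, as in gpfInnerGo)
def divAllBGo : Nat → Int → Int → PySem.Set Int → Int × PySem.Set Int
  | 0, _, x, s => (x, s)
  | fuel + 1, p, x, s =>
    if 2 ≤ p ∧ 0 < x ∧ PySem.Int.mod x p = 0 then
      divAllBGo fuel p (PySem.Int.floordiv x p) (PySem.Set.add s p)
    else (x, s)

def divAllB (p x : Int) (s : PySem.Set Int) : Int × PySem.Set Int :=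
  divAllBGo (x.toNat + 1) p x s

-- 'for p in primes: if p * p > x: break; <divide x by p fully>'
def factorLoopB (ps : List Int) (x : Int) (s : PySem.Set Int) : Int × PySem.Set Int :=
  match ps with
  | [] => (x, s)
  | p :: rest =>
    if p * p > x then (x, s)
    else factorLoopB rest (divAllB p x s).1 (divAllB p x s).2

-- body of 'for x in a: …; if x > 1: seen.add(x)'
def factorElemB (primes : List Int) (s : PySem.Set Int) (x : Int) : PySem.Set Int :=
  let r := factorLoopB primes x s
  if 1 < r.1 then PySem.Set.add r.2 r.1 else r.2

def solution_alt (n : Int) (a : List Int) : String :=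
  let m := a.foldl (fun m x => if x > m then x else m) 0
  let lim := isqrtLoop m 0
  let primes := buildPrimes lim
  let seen := a.foldl (factorElemB primes) PySem.Set.empty
  if PySem.Set.len seen ≤ n then "Yes" else "No"

-- ===== PRECONDITION & SPEC =====
def Spec_solution (n : Int) (a : List Int) (out : String) : Prop := out = solution_alt n a
instance (n : Int) (a : List Int) (out : String) : Decidable (Spec_solution n a out) := by unfold Spec_solution; infer_instance

-- ===== CLAIM (what is proved, stated in full; the proofs are below) =====
def Claim_equal_solution : Prop := ∀ (n : Int) (a : List Int), Dom_solution n a → Spec_solution n a (solution n a)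

-- ===== LEMMAS AND PROOFS =====

-- "q is a (positive) prime factor of x"
def IsPF (q x : Int) : Prop := 2 ≤ q ∧ Prime q ∧ q ∣ x

theorem int_prime_cast (p : Nat) (h : Nat.Prime p) : Prime (p : Int) := by
  rw [Int.prime_iff_natAbs_prime, Int.natAbs_natCast]; exact h

theorem primes_pos_dvd_eq {q p : Int} (hq2 : 2 ≤ q) (hqP : Prime q) (hp2 : 2 ≤ p)
    (hpP : Prime p) (hd : q ∣ p) : q = p := by
  have h1 : Nat.Prime q.natAbs := Int.prime_iff_natAbs_prime.mp hqP
  have h2 : Nat.Prime p.natAbs := Int.prime_iff_natAbs_prime.mp hpP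
  have h3 : q.natAbs ∣ p.natAbs := Int.natAbs_dvd_natAbs.mpr hd
  have h4 : q.natAbs = p.natAbs := (Nat.prime_dvd_prime_iff_eq h1 h2).mp h3
  omega

theorem dvd_prime_absurd {p n : Int} (hnP : Prime n) (hp2 : 2 ≤ p) (hpn : p < n)
    (hd : p ∣ n) : False := by
  have h1 : Nat.Prime n.natAbs := Int.prime_iff_natAbs_prime.mp hnP
  have h3 : p.natAbs ∣ n.natAbs := Int.natAbs_dvd_natAbs.mpr hd
  have h4 := h1.eq_one_or_self_of_dvd p.natAbs h3
  omega

theorem int_prime_of_no_small_prime_divisor {n : Int} (h2 : 2 ≤ n)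
    (h : ∀ q, 2 ≤ q → Prime q → q * q ≤ n → ¬ q ∣ n) : Prime n := by
  rw [Int.prime_iff_natAbs_prime]
  by_contra hN
  have hq := Nat.minFac_prime (n := n.natAbs) (by omega)
  have hsq := Nat.minFac_sq_le_self (n := n.natAbs) (by omega) hN
  have hdvd := Nat.minFac_dvd n.natAbs
  set q := n.natAbs.minFac with hqdef
  have hcast : ((n.natAbs : Int)) = n := Int.natAbs_of_nonneg (by omega)
  have hd : (q : Int) ∣ n := by rw [← hcast]; exact_mod_cast hdvd
  have hq2 : (2 : Int) ≤ (q : Int) := by exact_mod_cast hq.two_le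
  have hsq' : q * q ≤ n.natAbs := by rw [pow_two] at hsq; exact hsq
  have hqq : (q : Int) * (q : Int) ≤ n := by rw [← hcast]; exact_mod_cast hsq'
  exact h q hq2 (int_prime_cast q hq) hqq hd

theorem prime_of_smallest_divisor {i n : Int} (hi : 2 ≤ i) (hd : i ∣ n) (hn : 2 ≤ n)
    (h : ∀ j, 2 ≤ j → j < i → ¬ j ∣ n) : Prime i := by
  rw [Int.prime_iff_natAbs_prime]
  by_contra hN
  obtain ⟨m, hm1, hm2, hm3⟩ := Nat.exists_dvd_of_not_prime2 (n := i.natAbs) (by omega) hN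
  have hcast : ((i.natAbs : Int)) = i := Int.natAbs_of_nonneg (by omega)
  have hmi : (m : Int) ∣ i := by rw [← hcast]; exact_mod_cast hm1
  exact h m (by exact_mod_cast hm2) (by omega) (dvd_trans hmi hd)

theorem isPF_pos_two_le {q x : Int} (hx : 0 < x) (h : IsPF q x) : 2 ≤ x := by
  obtain ⟨hq2, hqP, hqd⟩ := h
  have hle := Int.le_of_dvd hx hqd
  omega

theorem isPF_factor_iff {p x x' : Int} (k : Nat) (hp2 : 2 ≤ p) (hpP : Prime p)
    (hx : x = p ^ k * x') (q : Int) :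
    IsPF q x ↔ ((p ∣ x ∧ q = p) ∨ IsPF q x') := by
  constructor
  · rintro ⟨hq2, hqP, hqd⟩
    rw [hx] at hqd
    rcases hqP.dvd_mul.mp hqd with hpow | hx'
    · rcases Nat.eq_zero_or_pos k with hk | hk
      · subst hk; simp at hpow
        exact absurd (isUnit_of_dvd_one hpow) hqP.not_unit
      · have hqp : q = p := primes_pos_dvd_eq hq2 hqP hp2 hpP (hqP.dvd_of_dvd_pow hpow)
        exact Or.inl ⟨by rw [hx]; exact Dvd.dvd.mul_right (dvd_pow_self p (by omega)) x', hqp⟩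
    · exact Or.inr ⟨hq2, hqP, hx'⟩
  · rintro (⟨hdvd, rfl⟩ | ⟨hq2, hqP, hqd⟩)
    · exact ⟨hp2, hpP, hdvd⟩
    · exact ⟨hq2, hqP, dvd_trans hqd ⟨p ^ k, by rw [hx]; ring⟩⟩

-- the final 'if leftover > 1: add it' step, used by both programs: when every prime
-- factor of x exceeds its square root, x is 1 or prime (or nonpositive)
theorem leftover_iff (x : Int) (s : PySem.Set Int)
    (H : ∀ q, IsPF q x → x < q * q) (q : Int) :
    (q ∈ (if 1 < x then PySem.Set.add s x else s)) ↔ q ∈ s ∨ (2 ≤ x ∧ IsPF q x) := by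
  by_cases h1 : 1 < x
  · have hxP : Prime x := by
      apply int_prime_of_no_small_prime_divisor (by omega)
      intro j hj2 hjP hjj hjd
      have := H j ⟨hj2, hjP, hjd⟩
      omega
    rw [if_pos h1, PySem.Set.mem_add]
    constructor
    · rintro (hs | rfl)
      · exact Or.inl hs
      · exact Or.inr ⟨by omega, by omega, hxP, dvd_refl q⟩
    · rintro (hs | ⟨hx2, hq2, hqP, hqd⟩)
      · exact Or.inl hs
      · right
        have hle := Int.le_of_dvd (by omega) hqd
        rcases eq_or_lt_of_le hle with rfl | hlt
        · rfl
        · exact absurd (dvd_prime_absurd hxP hq2 hlt hqd) (by simp)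
  · rw [if_neg h1]
    constructor
    · exact Or.inl
    · rintro (hs | ⟨hx2, _⟩)
      · exact hs
      · omega

-- the inner division loop only shrinks a positive n (any fuel)
theorem gpfInnerGo_pos_le (i : Int) : ∀ (fuel : Nat) (n : Int) (f : PySem.Set Int), 0 < n →
    0 < (gpfInnerGo fuel i n f).1 ∧ (gpfInnerGo fuel i n f).1 ≤ n := by
  intro fuel
  induction fuel with
  | zero => intro n f hn; exact ⟨hn, le_refl n⟩
  | succ fuel ih =>
    intro n f hn
    simp only [gpfInnerGo]
    split_ifs with h
    · obtain ⟨hi, hn', hm⟩ := h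
      have hd : i ∣ n := (PySem.Int.mod_eq_zero_iff_dvd n i).mp hm
      rw [PySem.Int.floordiv_eq_ediv_of_pos (show (0:Int) < i by omega)]
      have hmul : i * (n / i) = n := Int.mul_ediv_cancel' hd
      have h0 : 0 < n / i := by nlinarith [hmul]
      have h2 := ih (n / i) (PySem.Set.add f i) h0
      exact ⟨h2.1, by nlinarith [hmul, h2.2]⟩
    · exact ⟨hn, le_refl n⟩

theorem gpfInner_pos_le (i n : Int) (f : PySem.Set Int) (hn : 0 < n) :
    0 < (gpfInner i n f).1 ∧ (gpfInner i n f).1 ≤ n :=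
  gpfInnerGo_pos_le i (n.toNat + 1) n f hn

-- with enough fuel, the inner loop fully divides out i and records i exactly when i ∣ n
theorem gpfInnerGo_spec (i : Int) (hi : 2 ≤ i) : ∀ (fuel : Nat) (n : Int) (f : PySem.Set Int),
    0 < n → n.toNat < fuel →
    ∃ k : Nat, n = i ^ k * (gpfInnerGo fuel i n f).1 ∧ 0 < (gpfInnerGo fuel i n f).1 ∧
      ¬ i ∣ (gpfInnerGo fuel i n f).1 ∧
      (gpfInnerGo fuel i n f).2 = (if i ∣ n then PySem.Set.add f i else f) := by
  intro fuel
  induction fuel with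
  | zero => intro n f hn hfuel; omega
  | succ fuel ih =>
    intro n f hn hfuel
    simp only [gpfInnerGo]
    by_cases h : 2 ≤ i ∧ 0 < n ∧ PySem.Int.mod n i = 0
    · rw [if_pos h]
      obtain ⟨hi', hn', hm⟩ := h
      have hd : i ∣ n := (PySem.Int.mod_eq_zero_iff_dvd n i).mp hm
      rw [PySem.Int.floordiv_eq_ediv_of_pos (show (0:Int) < i by omega)]
      have hmul : i * (n / i) = n := Int.mul_ediv_cancel' hd
      have h0 : 0 < n / i := by nlinarith [hmul]
      have hlt : n / i < n := by nlinarith [hmul]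
      obtain ⟨k, hk1, hk2, hk3, hk4⟩ := ih (n / i) (PySem.Set.add f i) h0 (by omega)
      refine ⟨k + 1, ?_, hk2, hk3, ?_⟩
      · calc n = i * (n / i) := hmul.symm
          _ = i * (i ^ k * (gpfInnerGo fuel i (n / i) (f.add i)).1) := by conv_lhs => rw [hk1]
          _ = i ^ (k + 1) * (gpfInnerGo fuel i (n / i) (f.add i)).1 := by ring
      · rw [hk4, if_pos hd]
        split_ifs with h2
        · exact PySem.Set.add_of_mem (by rw [PySem.Set.mem_add]; right; rfl)
        · rfl
    · rw [if_neg h]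
      have hm : PySem.Int.mod n i ≠ 0 := by
        intro hc; exact h ⟨hi, hn, hc⟩
      have hnd : ¬ i ∣ n := fun hd => hm ((PySem.Int.mod_eq_zero_iff_dvd n i).mpr hd)
      exact ⟨0, by simp, hn, hnd, by rw [if_neg hnd]⟩

theorem gpfInner_spec (i : Int) (hi : 2 ≤ i) (n : Int) (f : PySem.Set Int) (hn : 0 < n) :
    ∃ k : Nat, n = i ^ k * (gpfInner i n f).1 ∧ 0 < (gpfInner i n f).1 ∧
      ¬ i ∣ (gpfInner i n f).1 ∧
      (gpfInner i n f).2 = (if i ∣ n then PySem.Set.add f i else f) :=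
  gpfInnerGo_spec i hi (n.toNat + 1) n f hn (by omega)

theorem nodup_gpfInnerGo (i : Int) : ∀ (fuel : Nat) (n : Int) (f : PySem.Set Int), f.Nodup →
    ((gpfInnerGo fuel i n f).2).Nodup := by
  intro fuel
  induction fuel with
  | zero => intro n f h; exact h
  | succ fuel ih =>
    intro n f h
    simp only [gpfInnerGo]
    split_ifs with hc
    · exact ih _ _ (PySem.Set.nodup_add f i h)
    · exact h

theorem nodup_gpfInner (i n : Int) (f : PySem.Set Int) (h : f.Nodup) :
    ((gpfInner i n f).2).Nodup :=
  nodup_gpfInnerGo i (n.toNat + 1) n f h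

-- the outer loop plus the final 'if n > 1: factors.add(n)' collects exactly the
-- prime factors of n on top of f (with enough fuel)
theorem gpfOuterGo_spec : ∀ (fuel : Nat) (i n : Int) (f : PySem.Set Int), 2 ≤ i → 0 < n →
    (∀ j, 2 ≤ j → j < i → ¬ j ∣ n) → (n - i).toNat < fuel →
    ∀ q, (q ∈ (if 1 < (gpfOuterGo fuel i n f).1
                then PySem.Set.add (gpfOuterGo fuel i n f).2 (gpfOuterGo fuel i n f).1
                else (gpfOuterGo fuel i n f).2)) ↔ q ∈ f ∨ IsPF q n := by
  intro fuel
  induction fuel with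
  | zero =>
    intro i n f hi hn hsmall hfuel q
    exact absurd hfuel (by omega)
  | succ fuel ih =>
    intro i n f hi hn hsmall hfuel q
    simp only [gpfOuterGo]
    by_cases hguard : i * i ≤ n
    · rw [if_pos hguard]
      have hii : i * i ≤ n := hguard
      have hn4 : 4 ≤ n := by nlinarith
      obtain ⟨k, hk1, hk2, hk3, hk4⟩ := gpfInner_spec i hi n f hn
      have hle := (gpfInner_pos_le i n f hn).2
      have hin : i ≤ n := by nlinarith
      have h2n : i + 1 ≤ n := by nlinarith
      by_cases hd : i ∣ n
      · have hiprime : Prime i := prime_of_smallest_divisor hi hd (by omega) hsmall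
        have hsmall' : ∀ j, 2 ≤ j → j < i + 1 → ¬ j ∣ (gpfInner i n f).1 := by
          intro j hj2 hji hjd
          rcases eq_or_lt_of_le (show j ≤ i by omega) with rfl | hlt
          · exact hk3 hjd
          · refine hsmall j hj2 hlt (dvd_trans hjd ⟨i ^ k, ?_⟩)
            conv_lhs => rw [hk1]
            ring
        have hthis := ih (i + 1) (gpfInner i n f).1 (gpfInner i n f).2
          (by omega) hk2 hsmall' (by omega) q
        rw [hthis, hk4, if_pos hd, PySem.Set.mem_add, isPF_factor_iff k hi hiprime hk1 q]
        tauto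
      · have hk0 : k = 0 := by
          by_contra hk0
          exact hd (by rw [hk1]; exact Dvd.dvd.mul_right (dvd_pow_self i hk0) _)
        have hr1 : (gpfInner i n f).1 = n := by
          rw [hk0] at hk1; simpa using hk1.symm
        have hsmall' : ∀ j, 2 ≤ j → j < i + 1 → ¬ j ∣ (gpfInner i n f).1 := by
          intro j hj2 hji
          rw [hr1]
          rcases eq_or_lt_of_le (show j ≤ i by omega) with rfl | hlt
          · exact hd
          · exact hsmall j hj2 hlt
        have hthis := ih (i + 1) (gpfInner i n f).1 (gpfInner i n f).2
          (by omega) hk2 hsmall' (by omega) q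
        rw [hthis, hk4, if_neg hd, hr1]
    · rw [if_neg hguard]
      have hii : n < i * i := by omega
      have H : ∀ q', IsPF q' n → n < q' * q' := by
        intro q' ⟨hq2, hqP, hqd⟩
        by_contra hc
        have hqq : q' * q' ≤ n := by omega
        have hqi : q' < i := by nlinarith
        exact hsmall q' hq2 hqi hqd
      have hiff2 : (2 ≤ n ∧ IsPF q n) ↔ IsPF q n :=
        ⟨And.right, fun h' => ⟨isPF_pos_two_le hn h', h'⟩⟩
      simpa [hiff2] using leftover_iff n f H q

theorem gpfOuter_spec (i n : Int) (f : PySem.Set Int) (hi : 2 ≤ i) (hn : 0 < n)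
    (hsmall : ∀ j, 2 ≤ j → j < i → ¬ j ∣ n) :
    ∀ q, (q ∈ (if 1 < (gpfOuter i n f).1
                then PySem.Set.add (gpfOuter i n f).2 (gpfOuter i n f).1
                else (gpfOuter i n f).2)) ↔ q ∈ f ∨ IsPF q n :=
  gpfOuterGo_spec ((n - i).toNat + 1) i n f hi hn hsmall (by omega)

theorem get_prime_factors_def (x : Int) : get_prime_factors x =
    (if 1 < (gpfOuter 2 x PySem.Set.empty).1
     then PySem.Set.add (gpfOuter 2 x PySem.Set.empty).2 (gpfOuter 2 x PySem.Set.empty).1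
     else (gpfOuter 2 x PySem.Set.empty).2) := rfl

theorem mem_get_prime_factors (x q : Int) :
    q ∈ get_prime_factors x ↔ (2 ≤ x ∧ IsPF q x) := by
  rw [get_prime_factors_def]
  rcases lt_or_ge 0 x with hx | hx
  · have h := gpfOuter_spec 2 x PySem.Set.empty (le_refl 2) hx
      (fun j h1 h2 h3 => by omega) q
    simp only [PySem.Set.empty, List.not_mem_nil, false_or] at h ⊢
    rw [h]
    constructor
    · intro hPF; exact ⟨isPF_pos_two_le hx hPF, hPF⟩
    · exact And.right
  · have houter : gpfOuter 2 x PySem.Set.empty = (x, PySem.Set.empty) := by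
      unfold gpfOuter
      simp only [gpfOuterGo]
      rw [if_neg (by omega : ¬ (2:Int) * 2 ≤ x)]
    rw [houter]
    simp only []
    rw [if_neg (by omega : ¬ (1:Int) < x)]
    constructor
    · intro hmem; exact absurd hmem (List.not_mem_nil)
    · rintro ⟨h2x, _⟩; omega

theorem mem_foldl_update (sets : List (PySem.Set Int)) :
    ∀ (s : PySem.Set Int) (q : Int),
      q ∈ sets.foldl (fun s ps => PySem.Set.update s ps) s ↔ q ∈ s ∨ ∃ t ∈ sets, q ∈ t := by
  induction sets with
  | nil => intro s q; simp
  | cons t ts ih =>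
    intro s q
    simp only [List.foldl_cons, ih, PySem.Set.mem_update, List.mem_cons]
    constructor
    · rintro ((h | h) | ⟨u, hu, hq⟩)
      · exact Or.inl h
      · exact Or.inr ⟨t, Or.inl rfl, h⟩
      · exact Or.inr ⟨u, Or.inr hu, hq⟩
    · rintro (h | ⟨u, (rfl | hu), hq⟩)
      · exact Or.inl (Or.inl h)
      · exact Or.inl (Or.inr hq)
      · exact Or.inr ⟨u, hu, hq⟩

theorem nodup_foldl_update (sets : List (PySem.Set Int)) :
    ∀ (s : PySem.Set Int), s.Nodup →
      (sets.foldl (fun s ps => PySem.Set.update s ps) s).Nodup := by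
  induction sets with
  | nil => intro s h; exact h
  | cons t ts ih => intro s h; exact ih _ (PySem.Set.nodup_update s t h)

-- ===== B-side lemmas =====

theorem maxLoop_spec (a : List Int) : ∀ (m : Int),
    m ≤ a.foldl (fun m x => if x > m then x else m) m ∧
    ∀ x ∈ a, x ≤ a.foldl (fun m x => if x > m then x else m) m := by
  induction a with
  | nil => intro m; simp
  | cons y ys ih =>
    intro m
    simp only [List.foldl_cons, List.mem_cons]
    have hstep : m ≤ (if y > m then y else m) ∧ y ≤ (if y > m then y else m) := by
      split_ifs <;> omega
    obtain ⟨h1, h2⟩ := ih (if y > m then y else m)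
    refine ⟨le_trans hstep.1 h1, ?_⟩
    rintro x (rfl | hx)
    · exact le_trans hstep.2 h1
    · exact h2 x hx

theorem isqrtLoopGo_spec : ∀ (fuel : Nat) (m lim : Int), 0 ≤ lim → (m - lim).toNat < fuel →
    0 ≤ isqrtLoopGo fuel m lim ∧
    m < (isqrtLoopGo fuel m lim + 1) * (isqrtLoopGo fuel m lim + 1) := by
  intro fuel
  induction fuel with
  | zero => intro m lim h0 hfuel; omega
  | succ fuel ih =>
    intro m lim h0 hfuel
    simp only [isqrtLoopGo]
    split_ifs with h
    · have hstep : lim + 1 ≤ m := by nlinarith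
      exact ih m (lim + 1) (by omega) (by omega)
    · exact ⟨h0, by omega⟩

theorem isqrtLoop_spec (m lim : Int) (h0 : 0 ≤ lim) :
    0 ≤ isqrtLoop m lim ∧ m < (isqrtLoop m lim + 1) * (isqrtLoop m lim + 1) :=
  isqrtLoopGo_spec ((m - lim).toNat + 1) m lim h0 (by omega)

theorem isPrimeLoop_false_iff (c : Int) : ∀ (ps : List Int), ps.Pairwise (· < ·) →
    (∀ p ∈ ps, 2 ≤ p) →
    (isPrimeLoop c ps = false ↔ ∃ p ∈ ps, p * p ≤ c ∧ p ∣ c) := by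
  intro ps hsort h2
  induction ps with
  | nil => simp [isPrimeLoop]
  | cons p rest ih =>
    have hp2 : 2 ≤ p := h2 p List.mem_cons_self
    have hhead : ∀ y ∈ rest, p < y := (List.pairwise_cons.mp hsort).1
    have hrest := ih (List.pairwise_cons.mp hsort).2
      (fun y hy => h2 y (List.mem_cons_of_mem p hy))
    rw [isPrimeLoop]
    split_ifs with hgt hmod
    · constructor
      · intro h; exact absurd h (by simp)
      · rintro ⟨p0, hp0, hsq, hdvd⟩
        rcases List.mem_cons.mp hp0 with rfl | hmem
        · omega
        · have := hhead p0 hmem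
          nlinarith [h2 p0 hp0]
    · simp only [true_iff]
      exact ⟨p, List.mem_cons_self, by omega, (PySem.Int.mod_eq_zero_iff_dvd c p).mp hmod⟩
    · rw [hrest]
      constructor
      · rintro ⟨p0, hp0, hsq, hdvd⟩
        exact ⟨p0, List.mem_cons_of_mem p hp0, hsq, hdvd⟩
      · rintro ⟨p0, hp0, hsq, hdvd⟩
        rcases List.mem_cons.mp hp0 with rfl | hmem
        · exact absurd ((PySem.Int.mod_eq_zero_iff_dvd c p0).mpr hdvd) hmod
        · exact ⟨p0, hmem, hsq, hdvd⟩

-- invariant: the primes list built so far is exactly the ascending primes below t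
def PrimesInv (t : Int) (P : List Int) : Prop :=
  P.Pairwise (· < ·) ∧ ∀ q, q ∈ P ↔ 2 ≤ q ∧ q < t ∧ Prime q

theorem primesStep (t : Int) (P : List Int) (ht : 2 ≤ t) (hP : PrimesInv t P) :
    PrimesInv (t + 1) (if isPrimeLoop t P then P ++ [t] else P) := by
  obtain ⟨hsort, hmem⟩ := hP
  have h2 : ∀ p ∈ P, 2 ≤ p := fun p hp => ((hmem p).mp hp).1
  have hlt : ∀ p ∈ P, p < t := fun p hp => ((hmem p).mp hp).2.1
  have hiff := isPrimeLoop_false_iff t P hsort h2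
  by_cases hprime : Prime t
  · have htrue : isPrimeLoop t P = true := by
      rcases Bool.eq_false_or_eq_true (isPrimeLoop t P) with ht' | hf
      · exact ht'
      · obtain ⟨p, hp, hsq, hdvd⟩ := hiff.mp hf
        exact absurd hdvd (fun hd => dvd_prime_absurd hprime (h2 p hp) (hlt p hp) hd)
    rw [htrue, if_pos rfl]
    constructor
    · rw [List.pairwise_append]
      refine ⟨hsort, List.pairwise_singleton _ _, ?_⟩
      intro p hp q hq
      rw [List.mem_singleton] at hq; subst hq; exact hlt p hp
    · intro q
      rw [List.mem_append, List.mem_singleton, hmem]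
      constructor
      · rintro (⟨hq2, hqt, hqP⟩ | rfl)
        · exact ⟨hq2, by omega, hqP⟩
        · exact ⟨ht, by omega, hprime⟩
      · rintro ⟨hq2, hqt, hqP⟩
        rcases eq_or_lt_of_le (show q ≤ t by omega) with rfl | hqlt
        · exact Or.inr rfl
        · exact Or.inl ⟨hq2, hqlt, hqP⟩
  · have hfalse : isPrimeLoop t P = false := by
      rw [hiff]
      have hN : ¬ Nat.Prime t.natAbs :=
        fun h => hprime (Int.prime_iff_natAbs_prime.mpr h)
      have hq := Nat.minFac_prime (n := t.natAbs) (by omega)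
      have hsq := Nat.minFac_sq_le_self (n := t.natAbs) (by omega) hN
      have hdvd := Nat.minFac_dvd t.natAbs
      set q := t.natAbs.minFac with hqdef
      have hcast : ((t.natAbs : Int)) = t := Int.natAbs_of_nonneg (by omega)
      have hd : (q : Int) ∣ t := by rw [← hcast]; exact_mod_cast hdvd
      have hq2 : (2 : Int) ≤ (q : Int) := by exact_mod_cast hq.two_le
      have hsq' : q * q ≤ t.natAbs := by rw [pow_two] at hsq; exact hsq
      have hqq : (q : Int) * (q : Int) ≤ t := by rw [← hcast]; exact_mod_cast hsq'
      refine ⟨(q : Int), ?_, hqq, hd⟩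
      rw [hmem]
      refine ⟨hq2, by nlinarith, int_prime_cast q hq⟩
    rw [hfalse]
    simp only [Bool.false_eq_true, if_false]
    refine ⟨hsort, fun q => ?_⟩
    rw [hmem]
    constructor
    · rintro ⟨hq2, hqt, hqP⟩; exact ⟨hq2, by omega, hqP⟩
    · rintro ⟨hq2, hqt, hqP⟩
      rcases eq_or_lt_of_le (show q ≤ t by omega) with rfl | hqlt
      · exact absurd hqP hprime
      · exact ⟨hq2, hqlt, hqP⟩

theorem buildPrimes_spec (lim : Int) : PrimesInv (lim + 1) (buildPrimes lim) := by
  unfold buildPrimes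
  rcases le_or_gt 2 (lim + 1) with h | h
  · obtain ⟨k, hk⟩ : ∃ k : Nat, lim + 1 = 2 + k := ⟨(lim - 1).toNat, by omega⟩
    rw [hk]
    clear hk h
    induction k with
    | zero =>
      rw [PySem.List.pyRange_one_eq_nil (by omega)]
      simp only [List.foldl_nil]
      refine ⟨List.Pairwise.nil, fun q => ?_⟩
      simp only [List.not_mem_nil, false_iff]
      rintro ⟨h1, h2, _⟩; omega
    | succ k ih =>
      have hr : PySem.List.pyRange 2 (2 + ((k : Int) + 1)) =
          PySem.List.pyRange 2 (2 + (k : Int)) ++ [2 + (k : Int)] := by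
        have := PySem.List.pyRange_one_succ_right (a := 2) (b := 2 + (k : Int)) (by omega)
        rw [← this, add_assoc]
      have hcast : ((k + 1 : Nat) : Int) = (k : Int) + 1 := by push_cast; ring
      rw [hcast, hr, List.foldl_append]
      have hstep := primesStep (2 + (k : Int)) _ (by omega) ih
      simp only [List.foldl_cons, List.foldl_nil]
      have : (2 : Int) + (k : Int) + 1 = 2 + ((k : Int) + 1) := by ring
      rw [← this]
      exact hstep
  · rw [PySem.List.pyRange_one_eq_nil (by omega)]
    refine ⟨List.Pairwise.nil, fun q => ?_⟩
    simp only [List.foldl_nil, List.not_mem_nil, false_iff]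
    rintro ⟨h1, h2, _⟩; omega

-- divAllB has the same body as gpfInner
theorem divAllBGo_eq_gpfInnerGo : ∀ (fuel : Nat) (p x : Int) (s : PySem.Set Int),
    divAllBGo fuel p x s = gpfInnerGo fuel p x s := by
  intro fuel
  induction fuel with
  | zero => intro p x s; rfl
  | succ fuel ih =>
    intro p x s
    simp only [divAllBGo, gpfInnerGo]
    split_ifs with h
    · exact ih p _ _
    · rfl

theorem divAllB_eq_gpfInner (p x : Int) (s : PySem.Set Int) :
    divAllB p x s = gpfInner p x s :=
  divAllBGo_eq_gpfInnerGo (x.toNat + 1) p x s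

theorem factorElemB_def (ps : List Int) (s : PySem.Set Int) (x : Int) :
    factorElemB ps s x =
      (if 1 < (factorLoopB ps x s).1
       then PySem.Set.add (factorLoopB ps x s).2 (factorLoopB ps x s).1
       else (factorLoopB ps x s).2) := rfl

-- B's per-element factorisation (loop + leftover add) collects exactly the prime
-- factors of x on top of s
theorem factorElemB_spec : ∀ (ps : List Int) (x : Int) (s : PySem.Set Int),
    ps.Pairwise (· < ·) → (∀ p ∈ ps, 2 ≤ p ∧ Prime p) →
    (∀ q, IsPF q x → q ∈ ps ∨ x < q * q) →
    ∀ q, q ∈ factorElemB ps s x ↔ q ∈ s ∨ (2 ≤ x ∧ IsPF q x) := by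
  intro ps
  induction ps with
  | nil =>
    intro x s _ _ H1 q
    rw [factorElemB_def]
    unfold factorLoopB
    exact leftover_iff x s (fun q' hq' => by
      rcases H1 q' hq' with hmem | hlt
      · exact absurd hmem (List.not_mem_nil)
      · exact hlt) q
  | cons p rest ih =>
    intro x s hsort hpp H1 q
    obtain ⟨hp2, hpP⟩ := hpp p List.mem_cons_self
    have hhead : ∀ y ∈ rest, p < y := (List.pairwise_cons.mp hsort).1
    by_cases hgt : p * p > x
    · have hstop : factorLoopB (p :: rest) x s = (x, s) := by
        rw [factorLoopB, if_pos hgt]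
      rw [factorElemB_def, hstop]
      apply leftover_iff
      intro q' hq'
      rcases H1 q' hq' with hmem | hlt
      · rcases List.mem_cons.mp hmem with rfl | hmem'
        · omega
        · have hpy := hhead q' hmem'
          nlinarith [hq'.1]
      · exact hlt
    · have hx0 : 0 < x := by nlinarith
      obtain ⟨k, hk1, hk2, hk3, hk4⟩ := gpfInner_spec p hp2 x s hx0
      rw [← divAllB_eq_gpfInner p x s] at hk1 hk2 hk3 hk4
      have hgo : factorLoopB (p :: rest) x s =
          factorLoopB rest (divAllB p x s).1 (divAllB p x s).2 := by
        rw [factorLoopB, if_neg hgt]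
      have hsub : (divAllB p x s).1 ∣ x := ⟨p ^ k, by (conv_lhs => rw [hk1]); ring⟩
      have hH1' : ∀ q', IsPF q' (divAllB p x s).1 → q' ∈ rest ∨ (divAllB p x s).1 < q' * q' := by
        intro q' hq'
        obtain ⟨hq2', hqP', hqd'⟩ := hq'
        have hqx : q' ∣ x := dvd_trans hqd' hsub
        rcases H1 q' ⟨hq2', hqP', hqx⟩ with hmem | hlt
        · rcases List.mem_cons.mp hmem with rfl | hmem'
          · exact absurd hqd' hk3
          · exact Or.inl hmem'
        · right
          have := Int.le_of_dvd hx0 hsub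
          omega
      have hrec := ih (divAllB p x s).1 (divAllB p x s).2
        (List.pairwise_cons.mp hsort).2
        (fun y hy => hpp y (List.mem_cons_of_mem p hy)) hH1' q
      have hfe : factorElemB (p :: rest) s x =
          factorElemB rest (divAllB p x s).2 (divAllB p x s).1 := by
        rw [factorElemB_def, factorElemB_def, hgo]
      rw [hfe, hrec, hk4]
      have hx2 : 2 ≤ x := by nlinarith
      have hfac := isPF_factor_iff k hp2 hpP hk1 q
      have hr1iff : (2 ≤ (divAllB p x s).1 ∧ IsPF q (divAllB p x s).1) ↔
          IsPF q (divAllB p x s).1 := by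
        constructor
        · exact And.right
        · intro h; exact ⟨isPF_pos_two_le hk2 h, h⟩
      rw [hr1iff]
      by_cases hd : p ∣ x
      · rw [if_pos hd, PySem.Set.mem_add]
        constructor
        · rintro ((hs | rfl) | hPF)
          · exact Or.inl hs
          · exact Or.inr ⟨hx2, hfac.mpr (Or.inl ⟨hd, rfl⟩)⟩
          · exact Or.inr ⟨hx2, hfac.mpr (Or.inr hPF)⟩
        · rintro (hs | ⟨_, hPF⟩)
          · exact Or.inl (Or.inl hs)
          · rcases hfac.mp hPF with ⟨_, rfl⟩ | hPF'
            · exact Or.inl (Or.inr rfl)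
            · exact Or.inr hPF'
      · rw [if_neg hd]
        constructor
        · rintro (hs | hPF)
          · exact Or.inl hs
          · exact Or.inr ⟨hx2, hfac.mpr (Or.inr hPF)⟩
        · rintro (hs | ⟨_, hPF⟩)
          · exact Or.inl hs
          · rcases hfac.mp hPF with ⟨hdx, _⟩ | hPF'
            · exact absurd hdx hd
            · exact Or.inr hPF'

theorem nodup_factorLoopB : ∀ (ps : List Int) (x : Int) (s : PySem.Set Int), s.Nodup →
    ((factorLoopB ps x s).2).Nodup := by
  intro ps
  induction ps with
  | nil => intro x s h; exact h
  | cons p rest ih =>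
    intro x s h
    rw [factorLoopB]
    split_ifs with hgt
    · exact h
    · rw [divAllB_eq_gpfInner]
      exact ih _ _ (nodup_gpfInner p x s h)

theorem nodup_factorElemB (primes : List Int) (s : PySem.Set Int) (x : Int)
    (h : s.Nodup) : (factorElemB primes s x).Nodup := by
  rw [factorElemB_def]
  have hnd := nodup_factorLoopB primes x s h
  split_ifs with h1
  · exact PySem.Set.nodup_add _ _ hnd
  · exact hnd

theorem nodup_foldl_factorElemB (primes : List Int) (a : List Int) :
    ∀ (s : PySem.Set Int), s.Nodup → (a.foldl (factorElemB primes) s).Nodup := by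
  induction a with
  | nil => intro s h; exact h
  | cons x xs ih => intro s h; exact ih _ (nodup_factorElemB primes s x h)

theorem mem_foldl_factorElemB (primes : List Int) (hsort : primes.Pairwise (· < ·))
    (hpp : ∀ p ∈ primes, 2 ≤ p ∧ Prime p) (m lim : Int) (hlim0 : 0 ≤ lim)
    (hm : m < (lim + 1) * (lim + 1))
    (hcompl : ∀ q', 2 ≤ q' → q' ≤ lim → Prime q' → q' ∈ primes) :
    ∀ (a : List Int) (s : PySem.Set Int), (∀ x ∈ a, x ≤ m) →
    ∀ q, q ∈ a.foldl (factorElemB primes) s ↔ q ∈ s ∨ ∃ x ∈ a, 2 ≤ x ∧ IsPF q x := by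
  intro a
  induction a with
  | nil => intro s _ q; simp
  | cons x xs ih =>
    intro s hbound q
    have hx_le : x ≤ m := hbound x List.mem_cons_self
    have hH1 : ∀ q', IsPF q' x → q' ∈ primes ∨ x < q' * q' := by
      intro q' ⟨hq2', hqP', _⟩
      by_cases hlt : x < q' * q'
      · exact Or.inr hlt
      · left
        have hq'lim : q' ≤ lim := by nlinarith
        exact hcompl q' hq2' hq'lim hqP'
    have hstep := factorElemB_spec primes x s hsort hpp hH1
    simp only [List.foldl_cons, List.mem_cons]
    rw [ih _ (fun y hy => hbound y (List.mem_cons_of_mem x hy)) q]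
    rw [hstep q]
    constructor
    · rintro ((hs | hx) | ⟨y, hy, hPF⟩)
      · exact Or.inl hs
      · exact Or.inr ⟨x, Or.inl rfl, hx⟩
      · exact Or.inr ⟨y, Or.inr hy, hPF⟩
    · rintro (hs | ⟨y, (rfl | hy), hPF⟩)
      · exact Or.inl (Or.inl hs)
      · exact Or.inl (Or.inr hPF)
      · exact Or.inr ⟨y, hy, hPF⟩

-- ===== VERDICT (by name: the statement is the Claim_ definition above) =====
theorem solution_spec : Claim_equal_solution := by
  unfold Claim_equal_solution Spec_solution
  intro n a _
  show (let prime_sets := a.map get_prime_factors;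
        let all_primes := prime_sets.foldl (fun s ps => PySem.Set.update s ps) PySem.Set.empty;
        if PySem.Set.len all_primes ≤ n then "Yes" else "No") =
       (let m := a.foldl (fun m x => if x > m then x else m) 0;
        let lim := isqrtLoop m 0;
        let primes := buildPrimes lim;
        let seen := a.foldl (factorElemB primes) PySem.Set.empty;
        if PySem.Set.len seen ≤ n then "Yes" else "No")
  simp only []
  -- names for the two accumulated sets
  set m := a.foldl (fun m x => if x > m then x else m) 0 with hmdef
  set lim := isqrtLoop m 0 with hlimdef
  set primes := buildPrimes lim with hpdef
  set SA := (a.map get_prime_factors).foldl (fun s ps => PySem.Set.update s ps) PySem.Set.empty with hSA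
  set SB := a.foldl (factorElemB primes) PySem.Set.empty with hSB
  have hmax := maxLoop_spec a 0
  have hlim := isqrtLoop_spec m 0 (le_refl 0)
  obtain ⟨hPsort, hPmem⟩ := buildPrimes_spec lim
  have hpp : ∀ p ∈ primes, 2 ≤ p ∧ Prime p := by
    intro p hp
    obtain ⟨h1, _, h3⟩ := (hPmem p).mp hp
    exact ⟨h1, h3⟩
  have hcompl : ∀ q', 2 ≤ q' → q' ≤ lim → Prime q' → q' ∈ primes := by
    intro q' h1 h2 h3
    exact (hPmem q').mpr ⟨h1, by omega, h3⟩
  have hmemA : ∀ q, q ∈ SA ↔ ∃ x ∈ a, 2 ≤ x ∧ IsPF q x := by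
    intro q
    rw [hSA, mem_foldl_update]
    simp only [PySem.Set.empty, List.not_mem_nil, false_or, List.mem_map]
    constructor
    · rintro ⟨t, ⟨x, hx, rfl⟩, hq⟩
      exact ⟨x, hx, (mem_get_prime_factors x q).mp hq⟩
    · rintro ⟨x, hx, hq⟩
      exact ⟨get_prime_factors x, ⟨x, hx, rfl⟩, (mem_get_prime_factors x q).mpr hq⟩
  have hmemB : ∀ q, q ∈ SB ↔ ∃ x ∈ a, 2 ≤ x ∧ IsPF q x := by
    intro q
    rw [hSB, mem_foldl_factorElemB primes hPsort hpp m lim hlim.1 hlim.2 hcompl a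
      PySem.Set.empty (fun x hx => hmax.2 x hx) q]
    simp [PySem.Set.empty]
  have hndA : SA.Nodup := nodup_foldl_update _ _ List.nodup_nil
  have hndB : SB.Nodup := nodup_foldl_factorElemB primes a _ List.nodup_nil
  have hperm : SA.Perm SB :=
    (List.perm_ext_iff_of_nodup hndA hndB).mpr (fun q => by rw [hmemA q, hmemB q])
  have hlen : PySem.Set.len SA = PySem.Set.len SB := by
    rw [PySem.Set.len_eq, PySem.Set.len_eq, hperm.length_eq]
  rw [hlen]
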